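-- pv_equiv track=rewrite | github.com/browonkim/cote | string conversion.py | getOptimalString
-- ===== SOURCE A (Python) =====
-- def getOptimalString(s):
--     count = [0, 0]
--     result = ''
--     for i in s:
--         count[int(i)] += 1
--     n = 0
--     while count[0] > 0 and count[1] > 0:
--         if n % 2 == 0:
--             result += '1'
--             count[1] -= 1
--         else:
--             result += '0'
--             count[0] -= 1
--         n += 1
--     if count[0] == 0:
--         result += '1' * count[1]
--     elif count[1] == 0:
--         result += '0' * count[0]
--     return ''.join(reversed(result))
-- ===== SOURCE B (Python) =====
-- def getOptimalString(s):
--     # same counting loop as A (so invalid characters still raise as in A),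
--     # then a closed-form construction replaces the pair-by-pair while loop
--     count = [0, 0]
--     for i in s:
--         count[int(i)] += 1
--     a, b = count
--     m = min(a, b)
--     pre = '10' * m + '0' * (a - m) + '1' * (b - m)
--     return pre[::-1]
-- ===== Notes on version B (the rewrite author's own statement) =====
-- stated objective: simpler
-- what changed: Keeps A's counting loop (so malformed input still raises) but replaces the pair-by-pair while loop and its remainder branches with the closed-form string '10'*min(a,b) + surplus run, reversed.
import Mathlib
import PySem

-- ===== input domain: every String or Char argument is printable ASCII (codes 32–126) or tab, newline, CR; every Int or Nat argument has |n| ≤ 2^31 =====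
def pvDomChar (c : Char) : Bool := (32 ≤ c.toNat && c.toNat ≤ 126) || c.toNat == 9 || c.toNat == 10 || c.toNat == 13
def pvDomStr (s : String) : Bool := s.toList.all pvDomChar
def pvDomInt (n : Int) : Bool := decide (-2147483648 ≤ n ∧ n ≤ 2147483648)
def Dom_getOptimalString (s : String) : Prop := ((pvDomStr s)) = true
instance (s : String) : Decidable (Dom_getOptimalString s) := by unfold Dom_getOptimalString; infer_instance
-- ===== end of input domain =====

-- B keeps A's counting loop but replaces the pair-by-pair while loop with a closed-form
-- string construction (simpler; same O(n) cost).

-- ===== PORT A =====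
-- 'for i in s: count[int(i)] += 1' over the two-cell list count = [0, 0].
-- int(i) is PySem.Int.ofStr?; a none (ValueError) or an index outside [0,1] (IndexError)
-- raises in Python — those inputs are excluded by Pre_, the port leaves the counts unchanged there.
def aCount : List Char → Int × Int → Int × Int
  | [], cnt => cnt
  | c :: rest, (c0, c1) =>
    aCount rest
      (match PySem.Int.ofStr? (String.mk [c]) with
       | some n => if n = 0 then (c0 + 1, c1) else if n = 1 then (c0, c1 + 1) else (c0, c1)
       | none => (c0, c1))

-- 'while count[0] > 0 and count[1] > 0: …' with the n-parity branch.
def aLoop (c0 c1 : Int) (n : Nat) (result : List Char) : List Char × Int × Int :=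
  if h : 0 < c0 ∧ 0 < c1 then
    if n % 2 = 0 then aLoop c0 (c1 - 1) (n + 1) (result ++ ['1'])
    else aLoop (c0 - 1) c1 (n + 1) (result ++ ['0'])
  else (result, c0, c1)
termination_by (c0 + c1).toNat
decreasing_by all_goals omega

def getOptimalString (s : String) : String :=
  let cnt := aCount s.toList (0, 0)
  let r := aLoop cnt.1 cnt.2 0 []
  let result :=
    if r.2.1 = 0 then r.1 ++ List.replicate r.2.2.toNat '1'      -- result += '1' * count[1]
    else if r.2.2 = 0 then r.1 ++ List.replicate r.2.1.toNat '0' -- result += '0' * count[0]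
    else r.1
  String.mk result.reverse   -- ''.join(reversed(result))

-- ===== PORT B =====
-- the same counting loop as Source B's (a fold over the characters), then the closed form
-- '10'*m + '0'*(a-m) + '1'*(b-m) built directly and reversed.
def bCount (l : List Char) : Int × Int :=
  l.foldl
    (fun cnt c =>
      match PySem.Int.ofStr? (String.mk [c]) with
      | some n => if n = 0 then (cnt.1 + 1, cnt.2) else if n = 1 then (cnt.1, cnt.2 + 1) else cnt
      | none => cnt)
    (0, 0)

def getOptimalString_alt (s : String) : String :=
  let cnt := bCount s.toList
  let a := cnt.1
  let b := cnt.2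
  let m := min a b
  let pre := (List.replicate m.toNat ['1', '0']).flatten
              ++ List.replicate (a - m).toNat '0' ++ List.replicate (b - m).toNat '1'
  String.mk pre.reverse

-- ===== PRECONDITION & SPEC =====
-- Pre_: A raises (ValueError/IndexError) on any character other than '0'/'1'.
def Pre_getOptimalString (s : String) : Prop := (s.toList.all (fun c => c == '0' || c == '1')) = true
instance (s : String) : Decidable (Pre_getOptimalString s) := by unfold Pre_getOptimalString; infer_instance
def pvWitness_getOptimalString : String := "01"

def Spec_getOptimalString (s : String) (out : String) : Prop := out = getOptimalString_alt s
instance (s : String) (out : String) : Decidable (Spec_getOptimalString s out) := by unfold Spec_getOptimalString; infer_instance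

-- ===== CLAIM (what is proved, stated in full; the proofs are below) =====
def Claim_equal_getOptimalString : Prop := ∀ (s : String), Dom_getOptimalString s → Pre_getOptimalString s → Spec_getOptimalString s (getOptimalString s)

-- ===== LEMMAS AND PROOFS =====

-- the pre-reverse string B builds, as a function of the two counts
def preList (a b : Nat) : List Char :=
  (List.replicate (min a b) ['1', '0']).flatten
    ++ List.replicate (a - min a b) '0' ++ List.replicate (b - min a b) '1'

-- A's post-loop tail ('result += …' branches)
def finishA (r : List Char × Int × Int) : List Char :=
  if r.2.1 = 0 then r.1 ++ List.replicate r.2.2.toNat '1'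
  else if r.2.2 = 0 then r.1 ++ List.replicate r.2.1.toNat '0'
  else r.1

lemma preList_succ_succ (a b : Nat) :
    preList (a + 1) (b + 1) = '1' :: '0' :: preList a b := by
  simp [preList, Nat.succ_min_succ, List.replicate_succ]

lemma aLoop_finish (b : Nat) : ∀ (a n : Nat) (acc : List Char), n % 2 = 0 →
    finishA (aLoop (a : Int) (b : Int) n acc) = acc ++ preList a b := by
  induction b with
  | zero =>
    intro a n acc _
    rw [aLoop]
    have : ¬ (0 < (a : Int) ∧ 0 < ((0 : Nat) : Int)) := by omega
    rw [dif_neg this]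
    cases a with
    | zero => simp [finishA, preList]
    | succ a' =>
      have ha : ((a' + 1 : Nat) : Int) ≠ 0 := by omega
      simp [finishA, preList, ha]
      omega
  | succ k ih =>
    intro a n acc hn
    cases a with
    | zero =>
      rw [aLoop]
      have : ¬ (0 < ((0 : Nat) : Int) ∧ 0 < ((k + 1 : Nat) : Int)) := by omega
      rw [dif_neg this]
      simp [finishA, preList]
    | succ a' =>
      have h1 : 0 < ((a' + 1 : Nat) : Int) ∧ 0 < ((k + 1 : Nat) : Int) := by
        constructor <;> omega
      rw [aLoop, dif_pos h1, if_pos hn]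
      have e1 : ((k + 1 : Nat) : Int) - 1 = (k : Int) := by omega
      rw [e1]
      cases k with
      | zero =>
        rw [aLoop]
        have : ¬ (0 < ((a' + 1 : Nat) : Int) ∧ 0 < ((0 : Nat) : Int)) := by omega
        rw [dif_neg this]
        have ha : ((a' + 1 : Nat) : Int) ≠ 0 := by omega
        simp [finishA, preList, ha, List.replicate_succ]
        omega
      | succ k' =>
        have h2 : 0 < ((a' + 1 : Nat) : Int) ∧ 0 < ((k' + 1 : Nat) : Int) := by
          constructor <;> omega
        rw [aLoop, dif_pos h2]
        have hodd : ¬ (n + 1) % 2 = 0 := by omega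
        rw [if_neg hodd]
        have e2 : ((a' + 1 : Nat) : Int) - 1 = (a' : Int) := by omega
        rw [e2]
        have hn2 : (n + 2) % 2 = 0 := by omega
        rw [ih a' (n + 2) (acc ++ ['1'] ++ ['0']) hn2]
        rw [preList_succ_succ]
        simp

lemma ofStr_zero : PySem.Int.ofStr? (String.mk ['0']) = some 0 := by decide
lemma ofStr_one : PySem.Int.ofStr? (String.mk ['1']) = some 1 := by decide

lemma aCount_eq (l : List Char) (h : ∀ c ∈ l, c = '0' ∨ c = '1') :
    ∀ c0 c1 : Int, aCount l (c0, c1) = (c0 + l.count '0', c1 + l.count '1') := by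
  induction l with
  | nil => intro c0 c1; simp [aCount]
  | cons c rest ih =>
    intro c0 c1
    have hc := h c (List.mem_cons_self ..)
    have hrest : ∀ x ∈ rest, x = '0' ∨ x = '1' := fun x hx => h x (List.mem_cons_of_mem _ hx)
    rcases hc with hc | hc <;> subst hc
    · rw [show aCount ('0' :: rest) (c0, c1) = aCount rest (c0 + 1, c1) by
        simp [aCount, ofStr_zero]]
      rw [ih hrest]
      simp
      omega
    · rw [show aCount ('1' :: rest) (c0, c1) = aCount rest (c0, c1 + 1) by
        simp [aCount, ofStr_one]]
      rw [ih hrest]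
      simp
      omega

lemma bCount_eq (l : List Char) (h : ∀ c ∈ l, c = '0' ∨ c = '1') :
    ∀ c0 c1 : Int,
      l.foldl
        (fun cnt c =>
          match PySem.Int.ofStr? (String.mk [c]) with
          | some n => if n = 0 then (cnt.1 + 1, cnt.2) else if n = 1 then (cnt.1, cnt.2 + 1) else cnt
          | none => cnt)
        (c0, c1) = (c0 + l.count '0', c1 + l.count '1') := by
  induction l with
  | nil => intro c0 c1; simp
  | cons c rest ih =>
    intro c0 c1
    have hc := h c (List.mem_cons_self ..)
    have hrest : ∀ x ∈ rest, x = '0' ∨ x = '1' := fun x hx => h x (List.mem_cons_of_mem _ hx)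
    rcases hc with hc | hc <;> subst hc
    · simp only [List.foldl_cons, ofStr_zero]
      rw [show (0 : Int) = 0 from rfl]
      simp only [reduceIte]
      rw [ih hrest (c0 + 1) c1]
      simp; omega
    · simp only [List.foldl_cons, ofStr_one]
      simp only [reduceIte, one_ne_zero]
      rw [ih hrest c0 (c1 + 1)]
      simp; omega

-- ===== VERDICT (by name: the statement is the Claim_ definition above) =====
theorem getOptimalString_spec : Claim_equal_getOptimalString := by
  intro s _ hpre'
  have hpre : ∀ c ∈ s.toList, c = '0' ∨ c = '1' := by
    intro c hc
    have := List.all_eq_true.mp hpre' c hc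
    simpa using this
  unfold Spec_getOptimalString getOptimalString getOptimalString_alt
  have hc : aCount s.toList (0, 0) =
      ((s.toList.count '0' : Int), (s.toList.count '1' : Int)) := by
    rw [aCount_eq s.toList hpre 0 0]; simp
  have hb : bCount s.toList = ((s.toList.count '0' : Int), (s.toList.count '1' : Int)) := by
    unfold bCount; rw [bCount_eq s.toList hpre 0 0]; simp
  simp only [hc, hb]
  have hA := aLoop_finish (s.toList.count '1') (s.toList.count '0') 0 [] rfl
  unfold finishA at hA
  simp only [preList] at hA
  simp only [hA]
  -- align Int min/sub/toNat with the Nat closed form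
  have e1 : (min ((s.toList.count '0' : ℕ) : Int) ((s.toList.count '1' : ℕ) : Int)).toNat
      = min (s.toList.count '0') (s.toList.count '1') := by omega
  have e2 : (((s.toList.count '0' : ℕ) : Int) - min ((s.toList.count '0' : ℕ) : Int) ((s.toList.count '1' : ℕ) : Int)).toNat
      = s.toList.count '0' - min (s.toList.count '0') (s.toList.count '1') := by omega
  have e3 : (((s.toList.count '1' : ℕ) : Int) - min ((s.toList.count '0' : ℕ) : Int) ((s.toList.count '1' : ℕ) : Int)).toNat
      = s.toList.count '1' - min (s.toList.count '0') (s.toList.count '1') := by omega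
  simp only [e1, e2, e3]
  simp
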